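-- pv_equiv track=rewrite | github.com/ahiliitb/MindWealth_UI | chatbot/smart_data_fetcher.py | _are_semantically_related
-- ===== SOURCE A (Python) =====
-- def _are_semantically_related(col1: str, col2: str) -> bool:
--     """
--     Check if two column names are semantically related.
--
--     Examples:
--     - "target" matches "target_1", "target_price", "target_reached"
--     - "entry" matches "entry_date", "entry_price", "entry_signal"
--     - "performance" matches "current_performance", "performance_pct"
--
--     Args:
--         col1: First column name (lowercase)
--         col2: Second column name (lowercase)
--
--     Returns:
--         True if semantically related
--     """
--     # Define keyword groups that are semantically related
--     related_groups = [
--         {'target', 'target_1', 'target_2', 'target_3', 'target_price', 'target_reached', 'target_hit'},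
--         {'entry', 'entry_date', 'entry_price', 'entry_signal', 'entry_time'},
--         {'exit', 'exit_date', 'exit_price', 'exit_signal', 'exit_time'},
--         {'performance', 'current_performance', 'performance_pct', 'perf', 'pnl'},
--         {'price', 'current_price', 'close_price', 'open_price', 'close', 'open'},
--         {'date', 'signal_date', 'entry_date', 'exit_date', 'timestamp'},
--         {'signal', 'signal_type', 'signal_date', 'signal_strength'},
--         {'volume', 'vol', 'avg_volume', 'volume_ratio'},
--         {'rsi', 'rsi_14', 'rsi_value'},
--         {'macd', 'macd_line', 'macd_signal', 'macd_hist'},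
--         {'bollinger', 'bb_upper', 'bb_lower', 'bb_mid', 'bb_width'},
--         {'stochastic', 'stoch', 'stoch_k', 'stoch_d'},
--         {'divergence', 'div', 'bullish_div', 'bearish_div'},
--         {'trend', 'trendline', 'uptrend', 'downtrend'},
--     ]
--
--     # Check if both columns belong to the same semantic group
--     for group in related_groups:
--         # Check if any word from col1 or col2 is in this group
--         col1_words = set(col1.replace('_', ' ').split())
--         col2_words = set(col2.replace('_', ' ').split())
--
--         if (any(word in group for word in col1_words) and
--             any(word in group for word in col2_words)):
--             return True
--
--     return False
-- ===== SOURCE B (Python) =====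
-- # Bitmask semantics: each semantic group is one bit; a token's mask ORs the bits
-- # of every group containing it. Two columns are related iff their masks intersect.
-- _TOKEN_MASK = {
--     'target': 1, 'target_1': 1, 'target_2': 1, 'target_3': 1,
--     'target_price': 1, 'target_reached': 1, 'target_hit': 1,
--     'entry': 2, 'entry_date': 34, 'entry_price': 2, 'entry_signal': 2, 'entry_time': 2,
--     'exit': 4, 'exit_date': 36, 'exit_price': 4, 'exit_signal': 4, 'exit_time': 4,
--     'performance': 8, 'current_performance': 8, 'performance_pct': 8, 'perf': 8, 'pnl': 8,
--     'price': 16, 'current_price': 16, 'close_price': 16, 'open_price': 16,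
--     'close': 16, 'open': 16,
--     'date': 32, 'signal_date': 96, 'timestamp': 32,
--     'signal': 64, 'signal_type': 64, 'signal_strength': 64,
--     'volume': 128, 'vol': 128, 'avg_volume': 128, 'volume_ratio': 128,
--     'rsi': 256, 'rsi_14': 256, 'rsi_value': 256,
--     'macd': 512, 'macd_line': 512, 'macd_signal': 512, 'macd_hist': 512,
--     'bollinger': 1024, 'bb_upper': 1024, 'bb_lower': 1024, 'bb_mid': 1024, 'bb_width': 1024,
--     'stochastic': 2048, 'stoch': 2048, 'stoch_k': 2048, 'stoch_d': 2048,
--     'divergence': 4096, 'div': 4096, 'bullish_div': 4096, 'bearish_div': 4096,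
--     'trend': 8192, 'trendline': 8192, 'uptrend': 8192, 'downtrend': 8192,
-- }
--
--
-- def _column_mask(col):
--     """OR of the group bits of every token of col."""
--     m = 0
--     for w in col.replace('_', ' ').split():
--         m |= _TOKEN_MASK.get(w, 0)
--     return m
--
--
-- def _are_semantically_related(col1: str, col2: str) -> bool:
--     return (_column_mask(col1) & _column_mask(col2)) != 0
-- ===== Notes on version B (the rewrite author's own statement) =====
-- stated objective: faster
-- what changed: Replaces A's loop over the 14 group sets (re-splitting both columns and double-scanning each group per iteration) by a flat token->bitmask table (one bit per semantic group): each column is split once and folded into a single integer mask, and the result is whether the two masks share a bit.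
import Mathlib
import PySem

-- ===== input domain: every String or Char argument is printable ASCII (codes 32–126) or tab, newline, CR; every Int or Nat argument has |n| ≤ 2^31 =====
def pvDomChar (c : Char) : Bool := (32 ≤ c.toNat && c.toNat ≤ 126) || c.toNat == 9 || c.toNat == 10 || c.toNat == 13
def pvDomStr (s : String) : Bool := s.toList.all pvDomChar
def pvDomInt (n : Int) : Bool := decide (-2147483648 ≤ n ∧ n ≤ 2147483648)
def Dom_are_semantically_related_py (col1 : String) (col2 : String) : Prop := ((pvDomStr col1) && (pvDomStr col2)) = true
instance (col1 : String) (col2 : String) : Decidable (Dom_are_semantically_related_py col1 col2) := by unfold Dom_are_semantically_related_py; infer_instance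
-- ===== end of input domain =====

-- B replaces A's loop over 14 group sets (re-splitting both columns and double-scanning each
-- group per iteration) by a flat token -> bitmask table: each column is split once and folded
-- into a single group-bitmask; related iff the two masks have a common bit.

-- ===== PORT A =====
-- A's literal group sets (Python set literals) and its early-return loop over them.
def pvGroupsA : List (PySem.Set String) :=
  [PySem.Set.ofList ["target", "target_1", "target_2", "target_3", "target_price", "target_reached", "target_hit"],
   PySem.Set.ofList ["entry", "entry_date", "entry_price", "entry_signal", "entry_time"],
   PySem.Set.ofList ["exit", "exit_date", "exit_price", "exit_signal", "exit_time"],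
   PySem.Set.ofList ["performance", "current_performance", "performance_pct", "perf", "pnl"],
   PySem.Set.ofList ["price", "current_price", "close_price", "open_price", "close", "open"],
   PySem.Set.ofList ["date", "signal_date", "entry_date", "exit_date", "timestamp"],
   PySem.Set.ofList ["signal", "signal_type", "signal_date", "signal_strength"],
   PySem.Set.ofList ["volume", "vol", "avg_volume", "volume_ratio"],
   PySem.Set.ofList ["rsi", "rsi_14", "rsi_value"],
   PySem.Set.ofList ["macd", "macd_line", "macd_signal", "macd_hist"],
   PySem.Set.ofList ["bollinger", "bb_upper", "bb_lower", "bb_mid", "bb_width"],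
   PySem.Set.ofList ["stochastic", "stoch", "stoch_k", "stoch_d"],
   PySem.Set.ofList ["divergence", "div", "bullish_div", "bearish_div"],
   PySem.Set.ofList ["trend", "trendline", "uptrend", "downtrend"]]

def pvALoop (col1 : String) (col2 : String) : List (PySem.Set String) → Bool
  | [] => false
  | group :: rest =>
    let col1Words : PySem.Set String :=
      PySem.Set.ofList (PySem.Str.split₀ (PySem.Str.replace col1 "_" " "))
    let col2Words : PySem.Set String :=
      PySem.Set.ofList (PySem.Str.split₀ (PySem.Str.replace col2 "_" " "))
    if col1Words.any (fun w => PySem.Set.contains group w) &&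
       col2Words.any (fun w => PySem.Set.contains group w) then true
    else pvALoop col1 col2 rest

def are_semantically_related_py (col1 : String) (col2 : String) : Bool :=
  pvALoop col1 col2 pvGroupsA

-- ===== PORT B =====
-- B's module-level dict _TOKEN_MASK: token -> bitmask of the semantic groups containing it.
def pvTokenMask : PySem.Dict String Int := PySem.Dict.ofList
  [("target", 1), ("target_1", 1), ("target_2", 1), ("target_3", 1),
   ("target_price", 1), ("target_reached", 1), ("target_hit", 1),
   ("entry", 2), ("entry_date", 34), ("entry_price", 2), ("entry_signal", 2), ("entry_time", 2),
   ("exit", 4), ("exit_date", 36), ("exit_price", 4), ("exit_signal", 4), ("exit_time", 4),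
   ("performance", 8), ("current_performance", 8), ("performance_pct", 8), ("perf", 8), ("pnl", 8),
   ("price", 16), ("current_price", 16), ("close_price", 16), ("open_price", 16),
   ("close", 16), ("open", 16),
   ("date", 32), ("signal_date", 96), ("timestamp", 32),
   ("signal", 64), ("signal_type", 64), ("signal_strength", 64),
   ("volume", 128), ("vol", 128), ("avg_volume", 128), ("volume_ratio", 128),
   ("rsi", 256), ("rsi_14", 256), ("rsi_value", 256),
   ("macd", 512), ("macd_line", 512), ("macd_signal", 512), ("macd_hist", 512),
   ("bollinger", 1024), ("bb_upper", 1024), ("bb_lower", 1024), ("bb_mid", 1024), ("bb_width", 1024),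
   ("stochastic", 2048), ("stoch", 2048), ("stoch_k", 2048), ("stoch_d", 2048),
   ("divergence", 4096), ("div", 4096), ("bullish_div", 4096), ("bearish_div", 4096),
   ("trend", 8192), ("trendline", 8192), ("uptrend", 8192), ("downtrend", 8192)]

-- _column_mask: fold the masks of col's tokens together with |=.
def pvColumnMask (col : String) : Int :=
  (PySem.Str.split₀ (PySem.Str.replace col "_" " ")).foldl
    (fun m w => Int.lor m (pvTokenMask.getD w 0)) 0  -- Python m |= …

def are_semantically_related_py_alt (col1 : String) (col2 : String) : Bool :=
  (Int.land (pvColumnMask col1) (pvColumnMask col2)) != 0  -- Python (… & …) != 0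

-- ===== PRECONDITION & SPEC =====
def Spec_are_semantically_related_py (col1 : String) (col2 : String) (out : Bool) : Prop := out = are_semantically_related_py_alt col1 col2
instance (col1 : String) (col2 : String) (out : Bool) : Decidable (Spec_are_semantically_related_py col1 col2 out) := by unfold Spec_are_semantically_related_py; infer_instance

-- ===== CLAIM (what is proved, stated in full; the proofs are below) =====
def Claim_equal_are_semantically_related_py : Prop := ∀ (col1 : String) (col2 : String), Dom_are_semantically_related_py col1 col2 → Spec_are_semantically_related_py col1 col2 (are_semantically_related_py col1 col2)

-- ===== LEMMAS AND PROOFS =====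

-- The plain group lists behind A's set literals (proof-side only).
def pvGroups : List (List String) :=
  [["target", "target_1", "target_2", "target_3", "target_price", "target_reached", "target_hit"],
   ["entry", "entry_date", "entry_price", "entry_signal", "entry_time"],
   ["exit", "exit_date", "exit_price", "exit_signal", "exit_time"],
   ["performance", "current_performance", "performance_pct", "perf", "pnl"],
   ["price", "current_price", "close_price", "open_price", "close", "open"],
   ["date", "signal_date", "entry_date", "exit_date", "timestamp"],
   ["signal", "signal_type", "signal_date", "signal_strength"],
   ["volume", "vol", "avg_volume", "volume_ratio"],
   ["rsi", "rsi_14", "rsi_value"],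
   ["macd", "macd_line", "macd_signal", "macd_hist"],
   ["bollinger", "bb_upper", "bb_lower", "bb_mid", "bb_width"],
   ["stochastic", "stoch", "stoch_k", "stoch_d"],
   ["divergence", "div", "bullish_div", "bearish_div"],
   ["trend", "trendline", "uptrend", "downtrend"]]

theorem pvGroupsA_eq : pvGroupsA = pvGroups.map PySem.Set.ofList := rfl

-- Nat-level token mask.
def pvNatMask (w : String) : Nat := (pvTokenMask.getD w 0).toNat

-- getD returns the default or a value stored under the queried key.
theorem pv_getD_cases {κ ν : Type} [BEq κ] [LawfulBEq κ] (d : PySem.Dict κ ν) (k : κ) (dflt : ν) :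
    d.getD k dflt = dflt ∨ (k, d.getD k dflt) ∈ d.items := by
  rcases h : d.get? k with _ | v
  · exact Or.inl (PySem.Dict.getD_of_get?_eq_none d dflt h)
  · right
    rw [PySem.Dict.getD_of_get?_eq_some d dflt h]
    exact PySem.Dict.mem_items_of_get?_eq_some d h

set_option maxRecDepth 40000

-- Table facts, checked by computation.
theorem pv_table_sound : ∀ p ∈ pvTokenMask.items,
    0 ≤ p.2 ∧ p.2.toNat < 16384 ∧
      ∀ i : Fin 14, p.2.toNat.testBit i.1 = true → p.1 ∈ pvGroups[i.1] := by decide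

theorem pv_table_complete :
    ∀ i : Fin 14, ∀ w ∈ pvGroups[i.1], (pvNatMask w).testBit i.1 = true := by decide

theorem pvGroups_length : pvGroups.length = 14 := rfl

theorem pv_natMask_nonneg (w : String) : 0 ≤ pvTokenMask.getD w 0 := by
  rcases pv_getD_cases pvTokenMask w 0 with h | h
  · rw [h]
  · exact (pv_table_sound _ h).1

theorem pv_natMask_testBit (w : String) (i : Nat) (h : (pvNatMask w).testBit i = true) :
    ∃ hk : i < pvGroups.length, w ∈ pvGroups[i] := by
  rcases pv_getD_cases pvTokenMask w 0 with h0 | hm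
  · rw [pvNatMask, h0] at h; simp [Nat.zero_testBit] at h
  · obtain ⟨-, hlt, hbit⟩ := pv_table_sound _ hm
    have hi : i < 14 := by
      by_contra hge
      have : (pvTokenMask.getD w 0).toNat < 2 ^ i := by
        calc (pvTokenMask.getD w 0).toNat < 2 ^ 14 := by norm_num at hlt ⊢; exact hlt
          _ ≤ 2 ^ i := Nat.pow_le_pow_right (by norm_num) (by omega)
      rw [pvNatMask, Nat.testBit_eq_false_of_lt this] at h
      exact absurd h (by simp)
    exact ⟨by rw [pvGroups_length]; exact hi, hbit ⟨i, hi⟩ h⟩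

theorem pv_natMask_of_mem (i : Nat) (hk : i < pvGroups.length) (w : String)
    (hw : w ∈ pvGroups[i]) : (pvNatMask w).testBit i = true :=
  pv_table_complete ⟨i, by rw [pvGroups_length] at hk; exact hk⟩ w hw

-- The Int fold of B computes the Nat fold (all masks are nonnegative).
theorem pv_fold_natCast (l : List String) (n : Nat) :
    l.foldl (fun m w => Int.lor m (pvTokenMask.getD w 0)) (n : Int) =
      ((l.foldl (fun m w => m ||| pvNatMask w) n : Nat) : Int) := by
  induction l generalizing n with
  | nil => simp
  | cons w ws ih =>
    simp only [List.foldl_cons]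
    have hstep : Int.lor (n : Int) (pvTokenMask.getD w 0) = ((n ||| pvNatMask w : Nat) : Int) := by
      conv_lhs => rw [← Int.toNat_of_nonneg (pv_natMask_nonneg w)]
      rfl
    rw [hstep]
    exact ih _

def pvNatColMask (col : String) : Nat :=
  (PySem.Str.split₀ (PySem.Str.replace col "_" " ")).foldl (fun m w => m ||| pvNatMask w) 0

theorem pvColumnMask_eq (col : String) : pvColumnMask col = (pvNatColMask col : Int) :=
  pv_fold_natCast _ 0

-- Bits of an or-fold.
theorem pv_testBit_fold (l : List String) (n : Nat) (i : Nat) :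
    (l.foldl (fun m w => m ||| pvNatMask w) n).testBit i =
      (n.testBit i || l.any (fun w => (pvNatMask w).testBit i)) := by
  induction l generalizing n with
  | nil => simp
  | cons w ws ih =>
    simp only [List.foldl_cons, List.any_cons, ih, Nat.testBit_lor, Bool.or_assoc]

theorem pv_colMask_testBit (col : String) (i : Nat) :
    (pvNatColMask col).testBit i = true ↔
      ∃ hk : i < pvGroups.length,
        ∃ w ∈ PySem.Str.split₀ (PySem.Str.replace col "_" " "), w ∈ pvGroups[i] := by
  rw [pvNatColMask, pv_testBit_fold]
  simp only [Nat.zero_testBit, Bool.false_or, List.any_eq_true]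
  constructor
  · rintro ⟨w, hw, hb⟩
    obtain ⟨hk, hmem⟩ := pv_natMask_testBit w i hb
    exact ⟨hk, w, hw, hmem⟩
  · rintro ⟨hk, w, hw, hmem⟩
    exact ⟨w, hw, pv_natMask_of_mem i hk w hmem⟩

-- A 'for …: if p x: return True / return False' loop is List.any.
theorem pv_ifloop_eq_any {α : Type} (p : α → Bool) (loop : List α → Bool)
    (h0 : loop [] = false) (hc : ∀ x xs, loop (x :: xs) = if p x then true else loop xs) :
    ∀ l : List α, loop l = l.any p := by
  intro l
  induction l with
  | nil => simpa using h0
  | cons x xs ih =>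
    rw [hc, List.any_cons, ih]
    cases p x <;> simp

theorem pvALoop_eq_any (col1 col2 : String) (gs : List (PySem.Set String)) :
    pvALoop col1 col2 gs =
      gs.any (fun group =>
        (PySem.Set.ofList (PySem.Str.split₀ (PySem.Str.replace col1 "_" " "))).any
            (fun w => PySem.Set.contains group w) &&
        (PySem.Set.ofList (PySem.Str.split₀ (PySem.Str.replace col2 "_" " "))).any
            (fun w => PySem.Set.contains group w)) :=
  pv_ifloop_eq_any _ (pvALoop col1 col2) rfl (fun _ _ => rfl) gs

theorem pv_anyWord_iff (col : String) (l : List String) :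
    (∃ x ∈ PySem.Set.ofList (PySem.Str.split₀ (PySem.Str.replace col "_" " ")),
        PySem.Set.contains (PySem.Set.ofList l) x = true) ↔
      ∃ w ∈ PySem.Str.split₀ (PySem.Str.replace col "_" " "), w ∈ l := by
  constructor
  · rintro ⟨w, hw, hc⟩
    refine ⟨w, (PySem.Set.mem_ofList _ w).mp hw, ?_⟩
    exact (PySem.Set.mem_ofList l w).mp (by simpa [PySem.Set.contains] using hc)
  · rintro ⟨w, hw, hc⟩
    refine ⟨w, (PySem.Set.mem_ofList _ w).mpr hw, ?_⟩
    simpa [PySem.Set.contains] using (PySem.Set.mem_ofList l w).mpr hc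

-- A nonzero Nat has a set bit.
theorem pv_exists_testBit_of_ne_zero {n : Nat} (h : n ≠ 0) : ∃ i, n.testBit i = true := by
  by_contra hc
  push Not at hc
  exact h (Nat.eq_of_testBit_eq (fun i => by
    rw [Nat.zero_testBit]
    exact Bool.eq_false_iff.mpr (fun hb => hc i hb)))

theorem pv_main (col1 col2 : String) :
    are_semantically_related_py col1 col2 = are_semantically_related_py_alt col1 col2 := by
  rw [Bool.eq_iff_iff]
  rw [are_semantically_related_py, pvALoop_eq_any, pvGroupsA_eq]
  rw [are_semantically_related_py_alt]
  rw [pvColumnMask_eq, pvColumnMask_eq]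
  rw [show Int.land ((pvNatColMask col1 : Int)) ((pvNatColMask col2 : Int)) =
        ((pvNatColMask col1 &&& pvNatColMask col2 : Nat) : Int) from rfl]
  simp only [bne_iff_ne, ne_eq, Int.natCast_eq_zero, List.any_eq_true, List.mem_map,
    Bool.and_eq_true]
  constructor
  · rintro ⟨_, ⟨l, hl, rfl⟩, h1, h2⟩
    obtain ⟨k, hk, hlk⟩ := List.mem_iff_getElem.mp hl
    intro hzero
    have hb : (pvNatColMask col1 &&& pvNatColMask col2).testBit k = true := by
      rw [Nat.testBit_land]
      have hb1 := (pv_colMask_testBit col1 k).mpr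
        ⟨hk, ((pv_anyWord_iff col1 l).mp h1).imp (fun w hw => by rw [hlk]; exact hw)⟩
      have hb2 := (pv_colMask_testBit col2 k).mpr
        ⟨hk, ((pv_anyWord_iff col2 l).mp h2).imp (fun w hw => by rw [hlk]; exact hw)⟩
      rw [hb1, hb2]; rfl
    rw [hzero, Nat.zero_testBit] at hb
    exact absurd hb (by simp)
  · intro hne
    obtain ⟨i, hi⟩ := pv_exists_testBit_of_ne_zero hne
    rw [Nat.testBit_land, Bool.and_eq_true] at hi
    obtain ⟨hk, hw1⟩ := (pv_colMask_testBit col1 i).mp hi.1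
    obtain ⟨hk2, hw2⟩ := (pv_colMask_testBit col2 i).mp hi.2
    refine ⟨PySem.Set.ofList (pvGroups[i]'hk),
      ⟨pvGroups[i]'hk, List.getElem_mem hk, rfl⟩, ?_, ?_⟩
    · exact (pv_anyWord_iff col1 _).mpr hw1
    · exact (pv_anyWord_iff col2 _).mpr hw2

-- ===== VERDICT (by name: the statement is the Claim_ definition above) =====
theorem are_semantically_related_py_spec : Claim_equal_are_semantically_related_py := by
  intro col1 col2 _
  unfold Spec_are_semantically_related_py
  exact pv_main col1 col2
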